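-- pv_equiv track=rewrite | github.com/bendinglee/mythiq-core | advanced_prompt_analyzer.py | _determine_progression_type
-- ===== SOURCE A (Python) =====
-- def _determine_progression_type(prompt: str) -> str:
--     """Determine how the player progresses through the game"""
--     if any(word in prompt for word in ['level', 'stage', 'world']):
--         return 'level_progression'
--     elif any(word in prompt for word in ['score', 'points', 'high score']):
--         return 'score_progression'
--     elif any(word in prompt for word in ['time', 'timer', 'countdown']):
--         return 'time_progression'
--     elif any(word in prompt for word in ['unlock', 'upgrade', 'improve']):
--         return 'unlock_progression'
--     else:
--         return 'continuous_progression'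
-- ===== SOURCE B (Python) =====
-- def _determine_progression_type(prompt: str) -> str:
--     """Determine how the player progresses through the game"""
--     ranked = {'level': 0, 'stage': 0, 'world': 0,
--               'score': 1, 'points': 1, 'high score': 1,
--               'time': 2, 'timer': 2, 'countdown': 2,
--               'unlock': 3, 'upgrade': 3, 'improve': 3}
--     labels = ['level_progression', 'score_progression', 'time_progression',
--               'unlock_progression', 'continuous_progression']
--     best = 4
--     for word, rank in ranked.items():
--         if rank < best and word in prompt:
--             best = rank
--     return labels[best]
-- ===== Notes on version B (the rewrite author's own statement) =====
-- stated objective: alternative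
-- what changed: Instead of an ordered if/elif chain of grouped any()-checks with early returns, B folds over a flat keyword-to-rank map computing the minimum matched rank and indexes a label table with it.
import Mathlib
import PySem

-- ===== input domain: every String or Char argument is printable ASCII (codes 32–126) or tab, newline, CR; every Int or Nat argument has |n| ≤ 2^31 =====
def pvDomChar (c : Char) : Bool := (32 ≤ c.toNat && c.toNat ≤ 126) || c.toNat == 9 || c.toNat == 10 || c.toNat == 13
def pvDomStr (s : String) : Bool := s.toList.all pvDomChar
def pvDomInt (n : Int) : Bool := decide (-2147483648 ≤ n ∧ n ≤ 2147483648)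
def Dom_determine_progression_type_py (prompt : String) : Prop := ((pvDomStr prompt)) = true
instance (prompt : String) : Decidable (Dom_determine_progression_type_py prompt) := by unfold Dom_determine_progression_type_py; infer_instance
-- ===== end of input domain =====

-- ===== PORT A =====
-- B replaces the ordered if/elif chain by a min-rank fold over a flat keyword table (alternative; same cost).
def determine_progression_type_py (prompt : String) : String :=
  if ["level", "stage", "world"].any (fun word => PySem.Str.isIn word prompt) then
    "level_progression"
  else if ["score", "points", "high score"].any (fun word => PySem.Str.isIn word prompt) then
    "score_progression"
  else if ["time", "timer", "countdown"].any (fun word => PySem.Str.isIn word prompt) then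
    "time_progression"
  else if ["unlock", "upgrade", "improve"].any (fun word => PySem.Str.isIn word prompt) then
    "unlock_progression"
  else
    "continuous_progression"

-- ===== PORT B =====
-- B: fold over a flat keyword→rank map taking the minimum matched rank, then index a label table.
def pvRanked : List (String × Nat) :=
  [("level", 0), ("stage", 0), ("world", 0),
   ("score", 1), ("points", 1), ("high score", 1),
   ("time", 2), ("timer", 2), ("countdown", 2),
   ("unlock", 3), ("upgrade", 3), ("improve", 3)]

def pvLabels : List String :=
  ["level_progression", "score_progression", "time_progression",
   "unlock_progression", "continuous_progression"]

def determine_progression_type_py_alt (prompt : String) : String :=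
  let best := pvRanked.foldl
    (fun best wr => if wr.2 < best && PySem.Str.isIn wr.1 prompt then wr.2 else best) 4
  pvLabels.getD best "continuous_progression"

-- ===== PRECONDITION & SPEC =====
def Spec_determine_progression_type_py (prompt : String) (out : String) : Prop := out = determine_progression_type_py_alt prompt
instance (prompt : String) (out : String) : Decidable (Spec_determine_progression_type_py prompt out) := by unfold Spec_determine_progression_type_py; infer_instance

-- ===== CLAIM (what is proved, stated in full; the proofs are below) =====
def Claim_equal_determine_progression_type_py : Prop := ∀ (prompt : String), Dom_determine_progression_type_py prompt → Spec_determine_progression_type_py prompt (determine_progression_type_py prompt)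

-- ===== LEMMAS AND PROOFS =====
def chainN (g1 g2 g3 g4 : Bool) : Nat :=
  if g1 then 0 else if g2 then 1 else if g3 then 2 else if g4 then 3 else 4

theorem foldB : ∀ (b1 b2 b3 b4 b5 b6 b7 b8 b9 b10 b11 b12 : Bool),
    ([(b1,0),(b2,0),(b3,0),(b4,1),(b5,1),(b6,1),(b7,2),(b8,2),(b9,2),(b10,3),(b11,3),(b12,3)] :
        List (Bool × Nat)).foldl (fun best br => if br.2 < best && br.1 then br.2 else best) 4
      = chainN (b1 || (b2 || b3)) (b4 || (b5 || b6)) (b7 || (b8 || b9)) (b10 || (b11 || b12)) := by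
  decide

set_option maxHeartbeats 2000000 in
theorem fold_chain (prompt : String) :
    pvRanked.foldl (fun best wr => if wr.2 < best && PySem.Str.isIn wr.1 prompt then wr.2 else best) 4
      = chainN
          (PySem.Str.isIn "level" prompt || (PySem.Str.isIn "stage" prompt || PySem.Str.isIn "world" prompt))
          (PySem.Str.isIn "score" prompt || (PySem.Str.isIn "points" prompt || PySem.Str.isIn "high score" prompt))
          (PySem.Str.isIn "time" prompt || (PySem.Str.isIn "timer" prompt || PySem.Str.isIn "countdown" prompt))
          (PySem.Str.isIn "unlock" prompt || (PySem.Str.isIn "upgrade" prompt || PySem.Str.isIn "improve" prompt)) :=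
  foldB (PySem.Str.isIn "level" prompt) (PySem.Str.isIn "stage" prompt) (PySem.Str.isIn "world" prompt)
    (PySem.Str.isIn "score" prompt) (PySem.Str.isIn "points" prompt) (PySem.Str.isIn "high score" prompt)
    (PySem.Str.isIn "time" prompt) (PySem.Str.isIn "timer" prompt) (PySem.Str.isIn "countdown" prompt)
    (PySem.Str.isIn "unlock" prompt) (PySem.Str.isIn "upgrade" prompt) (PySem.Str.isIn "improve" prompt)

-- ===== VERDICT (by name: the statement is the Claim_ definition above) =====
theorem determine_progression_type_py_spec : Claim_equal_determine_progression_type_py := by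
  intro prompt _
  unfold Spec_determine_progression_type_py determine_progression_type_py
    determine_progression_type_py_alt
  rw [fold_chain]
  simp only [List.any_cons, List.any_nil, Bool.or_false]
  generalize (PySem.Str.isIn "level" prompt || (PySem.Str.isIn "stage" prompt || PySem.Str.isIn "world" prompt)) = g1
  generalize (PySem.Str.isIn "score" prompt || (PySem.Str.isIn "points" prompt || PySem.Str.isIn "high score" prompt)) = g2
  generalize (PySem.Str.isIn "time" prompt || (PySem.Str.isIn "timer" prompt || PySem.Str.isIn "countdown" prompt)) = g3
  generalize (PySem.Str.isIn "unlock" prompt || (PySem.Str.isIn "upgrade" prompt || PySem.Str.isIn "improve" prompt)) = g4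
  revert g1 g2 g3 g4
  decide
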